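-- pv_equiv track=rewrite | github.com/bcmin1018/codingtest | 코딩테스트합격자되기/해시/문제21 할인행사.py | solution
-- ===== SOURCE A (Python) =====
-- def solution(want, number, discount):
--     dic = {}
--     for w, n in zip(want, number):
--         dic[w] = n
--     iter = len(discount) - 10 + 1
--     answer = 0
--     for i in range(0, iter):
--         dic_10d = {}
--         for d in discount[0+i : 10+i]:
--             if d in dic_10d:
--                 dic_10d[d] += 1
--             else:
--                 dic_10d[d] = 1
--         if dic == dic_10d:
--             answer += 1
--     return answer
-- ===== SOURCE B (Python) =====
-- def solution(want, number, discount):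
--     target = {}
--     for w, n in zip(want, number):
--         target[w] = n
--     # only 10 positive wanted counts can ever be matched by a 10-day window
--     if any(v <= 0 for v in target.values()) or sum(target.values()) != 10:
--         return 0
--     goal = sorted(k for k, v in target.items() for _ in range(v))
--     answer = 0
--     for i in range(len(discount) - 9):
--         if sorted(discount[i:i+10]) == goal:
--             answer += 1
--     return answer
-- ===== Notes on version B (the rewrite author's own statement) =====
-- stated objective: alternative
-- what changed: B replaces A's per-window counting-dict construction and dict comparison by a multiset test: unless the wanted counts are exactly 10 positive items it returns 0 immediately (no window can match), otherwise it expands them once into a sorted 10-item reference list and compares each window sorted against it.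
import Mathlib
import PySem

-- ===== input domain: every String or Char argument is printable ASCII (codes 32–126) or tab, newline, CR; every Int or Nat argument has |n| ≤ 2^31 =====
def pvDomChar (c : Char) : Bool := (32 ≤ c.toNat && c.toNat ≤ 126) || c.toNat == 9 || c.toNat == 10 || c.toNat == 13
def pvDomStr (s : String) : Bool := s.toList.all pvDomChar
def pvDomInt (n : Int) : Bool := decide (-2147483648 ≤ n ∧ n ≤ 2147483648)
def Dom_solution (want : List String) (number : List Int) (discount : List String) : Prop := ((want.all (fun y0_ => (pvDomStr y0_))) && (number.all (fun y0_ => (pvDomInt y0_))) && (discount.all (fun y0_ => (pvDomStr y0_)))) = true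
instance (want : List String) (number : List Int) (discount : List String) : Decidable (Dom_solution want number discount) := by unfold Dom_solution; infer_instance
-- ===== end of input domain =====

-- B drops A's per-window counting dict entirely: it expands the wanted counts once into a
-- sorted reference list and compares each window sorted (a multiset test), after an early 0
-- when the wanted counts are not 10 positive items (then no window can match); objective: alternative.

-- ===== PORT A =====
-- Python's `d1 == d2` on dicts (order-insensitive): same size and every item of d1 looked up in d2;
-- exact because both dicts keep unique keys.
def pyDictEq (d1 d2 : PySem.Dict String Int) : Bool :=
  (d1.size == d2.size) && d1.items.all (fun kv => d2.get? kv.1 == some kv.2)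

def solution (want : List String) (number : List Int) (discount : List String) : Int :=
  let dic := (want.zip number).foldl (fun d wn => d.insert wn.1 wn.2) PySem.Dict.empty
  let iter := (discount.length : Int) - 10 + 1
  (PySem.List.pyRange 0 iter 1).foldl (fun answer i =>
    let dic10 := (PySem.List.slice discount (some (0 + i)) (some (10 + i))).foldl
      (fun d2 x => if d2.contains x then d2.insert x (d2.getD x 0 + 1) else d2.insert x 1)
      PySem.Dict.empty
    if pyDictEq dic dic10 then answer + 1 else answer) 0

-- ===== PORT B =====
-- `for _ in range(v)` contributes max(v,0) copies = List.replicate v.toNat.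
def solution_alt (want : List String) (number : List Int) (discount : List String) : Int :=
  let target := (want.zip number).foldl (fun d wn => d.insert wn.1 wn.2) PySem.Dict.empty
  if target.values.any (fun v => decide (v ≤ 0)) || decide (target.values.sum ≠ 10) then 0
  else
    let goal := PySem.List.sorted
      (target.items.flatMap (fun kv => List.replicate kv.2.toNat kv.1)) (fun x => x)
    (PySem.List.pyRange 0 ((discount.length : Int) - 9) 1).foldl (fun answer i =>
      if PySem.List.sorted (PySem.List.slice discount (some i) (some (i + 10))) (fun x => x) = goal
      then answer + 1 else answer) 0

-- ===== PRECONDITION & SPEC =====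
def Spec_solution (want : List String) (number : List Int) (discount : List String) (out : Int) : Prop := out = solution_alt want number discount
instance (want : List String) (number : List Int) (discount : List String) (out : Int) : Decidable (Spec_solution want number discount out) := by unfold Spec_solution; infer_instance

-- ===== CLAIM (what is proved, stated in full; the proofs are below) =====
def Claim_equal_solution : Prop := ∀ (want : List String) (number : List Int) (discount : List String), Dom_solution want number discount → Spec_solution want number discount (solution want number discount)

-- ===== LEMMAS AND PROOFS =====

-- A's inner window loop builds exactly Counter(window)
theorem winfold_eq_counter (w : List String) :
    w.foldl (fun d2 x => if d2.contains x then d2.insert x (d2.getD x 0 + 1) else d2.insert x 1)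
      PySem.Dict.empty = PySem.Dict.counter w := by
  rw [← PySem.Dict.foldl_insert_getD_add_one_eq_counter]
  congr 1
  funext d x
  split_ifs with h
  · rfl
  · have h' : d.contains x = false := by simpa using h
    rw [PySem.Dict.getD_of_not_contains d 0 h', zero_add]

-- Characterisation of Python's dict equality against a window counter
theorem dictEq_counter_eq (T : PySem.Dict String Int) (hT : T.keys.Nodup) (w : List String) :
    pyDictEq T (PySem.Dict.counter w) =
      (w.all (fun d => T.contains d) &&
       T.items.all (fun kv => ((w.count kv.1 : Int) == kv.2) && decide (0 < kv.2))) := by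
  rw [Bool.eq_iff_iff]
  simp only [pyDictEq, Bool.and_eq_true, List.all_eq_true, beq_iff_eq, decide_eq_true_eq]
  have hget : ∀ (k : String) (v : Int),
      (PySem.Dict.counter w).get? k = some v ↔ k ∈ w ∧ v = (w.count k : Int) := by
    intro k v
    rw [PySem.Dict.get?_eq_some_iff_mem_items _ _ _ (PySem.Dict.nodup_keys_counter w),
        PySem.Dict.items_counter]
    simp only [List.mem_map, PySem.Set.mem_ofList, Prod.mk.injEq]
    constructor
    · rintro ⟨a, ha, rfl, rfl⟩; exact ⟨ha, rfl⟩
    · rintro ⟨hk, rfl⟩; exact ⟨k, hk, rfl, rfl⟩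
  have hkeys : ∀ k : String, k ∈ T.keys ↔ ∃ v, (k, v) ∈ T.items := by
    intro k
    simp only [PySem.Dict.keys, List.mem_map]
    constructor
    · rintro ⟨⟨a, b⟩, hab, rfl⟩; exact ⟨b, hab⟩
    · rintro ⟨v, hv⟩; exact ⟨(k, v), hv, rfl⟩
  have hsizeT : T.size = T.keys.length := by
    simp [PySem.Dict.size, PySem.Dict.keys]
  have hsizeC : (PySem.Dict.counter w).size = (PySem.Set.ofList w).length := by
    simp [PySem.Dict.size, PySem.Dict.items_counter]
  constructor
  · rintro ⟨hsize, hmem⟩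
    have hsub : T.keys ⊆ PySem.Set.ofList w := by
      intro k hk
      rcases (hkeys k).1 hk with ⟨v, hv⟩
      exact (PySem.Set.mem_ofList w k).2 ((hget k v).1 (hmem _ hv)).1
    have hlen : T.keys.length = (PySem.Set.ofList w).length := by
      rw [← hsizeT, ← hsizeC]; exact hsize
    have hperm : T.keys.Perm (PySem.Set.ofList w) :=
      (hT.subperm hsub).perm_of_length_le (le_of_eq hlen.symm)
    refine ⟨fun d hd => ?_, fun kv hkv => ?_⟩
    · exact (PySem.Dict.contains_iff_mem_keys T d).2
        (hperm.symm.subset ((PySem.Set.mem_ofList w d).2 hd))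
    · rcases (hget kv.1 kv.2).1 (hmem kv hkv) with ⟨hw, hv⟩
      refine ⟨hv.symm, ?_⟩
      rw [hv]
      exact_mod_cast List.count_pos_iff.2 hw
  · rintro ⟨hcont, hvals⟩
    have hsub : T.keys ⊆ PySem.Set.ofList w := by
      intro k hk
      rcases (hkeys k).1 hk with ⟨v, hv⟩
      rcases hvals (k, v) hv with ⟨hc, hpos⟩
      have hkw : k ∈ w := by
        refine List.count_pos_iff.1 ?_
        have : (0 : Int) < (w.count k : Int) := by rw [hc]; exact hpos
        exact_mod_cast this
      exact (PySem.Set.mem_ofList w k).2 hkw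
    have hsub2 : PySem.Set.ofList w ⊆ T.keys := fun k hk =>
      (PySem.Dict.contains_iff_mem_keys T k).1 (hcont k ((PySem.Set.mem_ofList w k).1 hk))
    have hperm : T.keys.Perm (PySem.Set.ofList w) :=
      (hT.subperm hsub).antisymm ((PySem.Set.nodup_ofList w).subperm hsub2)
    refine ⟨by rw [hsizeT, hsizeC]; exact hperm.length_eq, fun kv hkv => ?_⟩
    rcases hvals kv hkv with ⟨hc, hpos⟩
    refine (hget kv.1 kv.2).2 ⟨?_, hc.symm⟩
    refine List.count_pos_iff.1 ?_
    have : (0 : Int) < (w.count kv.1 : Int) := by rw [hc]; exact hpos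
    exact_mod_cast this

-- count of k in the expanded reference multiset
theorem count_expand (items : List (String × Int)) (h : (items.map Prod.fst).Nodup)
    (k : String) (v : Int) (hm : (k, v) ∈ items) :
    (items.flatMap (fun kv => List.replicate kv.2.toNat kv.1)).count k = v.toNat := by
  induction items with
  | nil => cases hm
  | cons p rest ih =>
    simp only [List.map_cons, List.nodup_cons] at h
    simp only [List.flatMap_cons, List.count_append, List.count_replicate]
    rcases List.mem_cons.1 hm with heq | hm'
    · subst heq
      have h0 : (rest.flatMap (fun kv => List.replicate kv.2.toNat kv.1)).count k = 0 := by
        rw [List.count_eq_zero]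
        intro hkmem
        rcases List.mem_flatMap.1 hkmem with ⟨kv, hkv, hrep⟩
        have hk : k = kv.1 := List.eq_of_mem_replicate hrep
        exact h.1 (by rw [hk]; exact List.mem_map.2 ⟨kv, hkv, rfl⟩)
      simp [h0]
    · have hne : p.1 ≠ k := by
        intro hk
        exact h.1 (hk ▸ List.mem_map.2 ⟨(k, v), hm', rfl⟩)
      rw [ih h.2 hm']
      simp [hne]

theorem count_expand_zero (items : List (String × Int)) (k : String)
    (hk : k ∉ items.map Prod.fst) :
    (items.flatMap (fun kv => List.replicate kv.2.toNat kv.1)).count k = 0 := by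
  rw [List.count_eq_zero]
  intro hkmem
  rcases List.mem_flatMap.1 hkmem with ⟨kv, hkv, hrep⟩
  rcases List.eq_of_mem_replicate hrep with rfl
  exact hk (List.mem_map_of_mem hkv)

-- the per-window condition: A's dict-equality test = B's sorted-multiset test, given positive values
theorem char_eq_sorted (T : PySem.Dict String Int) (hT : T.keys.Nodup)
    (hpos : ∀ kv ∈ T.items, (0 : Int) < kv.2) (w : List String) :
    (w.all (fun d => T.contains d) &&
     T.items.all (fun kv => ((w.count kv.1 : Int) == kv.2) && decide (0 < kv.2))) =
    decide (PySem.List.sorted w (fun x => x) =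
      PySem.List.sorted (T.items.flatMap (fun kv => List.replicate kv.2.toNat kv.1)) (fun x => x)) := by
  have hkeys : T.keys = T.items.map Prod.fst := by simp [PySem.Dict.keys]
  have hTn : (T.items.map Prod.fst).Nodup := hkeys ▸ hT
  rw [Bool.eq_iff_iff, decide_eq_true_eq, PySem.List.sorted_id_eq_sorted_id_iff_perm,
    List.perm_iff_count]
  simp only [Bool.and_eq_true, List.all_eq_true, Bool.and_eq_true, beq_iff_eq,
    decide_eq_true_eq]
  constructor
  · rintro ⟨hcont, hvals⟩ x
    by_cases hx : x ∈ T.items.map Prod.fst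
    · rcases List.mem_map.1 hx with ⟨kv, hkv, rfl⟩
      rcases hvals kv hkv with ⟨hc, _⟩
      rw [count_expand T.items hTn kv.1 kv.2 hkv]
      omega
    · rw [count_expand_zero T.items x hx, List.count_eq_zero]
      intro hxw
      exact hx (hkeys ▸ (PySem.Dict.contains_iff_mem_keys T x).1 (hcont x hxw))
  · intro hcnt
    constructor
    · intro d hd
      rw [PySem.Dict.contains_iff_mem_keys, hkeys]
      by_contra hnd
      have := hcnt d
      rw [count_expand_zero T.items d hnd, List.count_eq_zero] at this
      exact this hd
    · intro kv hkv
      have hp := hpos kv hkv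
      have := hcnt kv.1
      rw [count_expand T.items hTn kv.1 kv.2 hkv] at this
      exact ⟨by omega, hp⟩

-- a fold counting a condition that never holds stays at its start
theorem foldl_if_false {α : Type} (c : α → Bool) (l : List α)
    (h : ∀ i ∈ l, c i = false) (a : Int) :
    l.foldl (fun ans i => if c i then ans + 1 else ans) a = a := by
  induction l generalizing a with
  | nil => rfl
  | cons x xs ih =>
    simp only [List.foldl_cons, h x List.mem_cons_self]
    exact ih (fun i hi => h i (List.mem_cons_of_mem x hi)) a

-- length of the expanded reference multiset, when all values are positive
theorem length_expand (items : List (String × Int)) (hpos : ∀ kv ∈ items, (0 : Int) < kv.2) :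
    ((items.flatMap (fun kv => List.replicate kv.2.toNat kv.1)).length : Int) =
      (items.map Prod.snd).sum := by
  induction items with
  | nil => rfl
  | cons p rest ih =>
    simp only [List.flatMap_cons, List.length_append, List.length_replicate, List.map_cons,
      List.sum_cons]
    rw [← ih (fun kv hkv => hpos kv (List.mem_cons_of_mem p hkv))]
    have := hpos p List.mem_cons_self
    omega

-- every window A scans has exactly 10 days
theorem window_length (discount : List String) (i : Int)
    (hi : i ∈ PySem.List.pyRange 0 ((discount.length : Int) - 9) 1) :
    (PySem.List.slice discount (some i) (some (i + 10))).length = 10 := by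
  rcases (PySem.List.mem_pyRange_one).1 hi with ⟨h0, h1⟩
  rw [PySem.List.slice_toNat discount h0 (by omega)]
  simp only [List.length_take, List.length_drop]
  omega

-- ===== VERDICT (by name: the statement is the Claim_ definition above) =====
theorem solution_spec : Claim_equal_solution := by
  intro want number discount _
  show _ = solution_alt want number discount
  simp only [solution, solution_alt]
  set T := (want.zip number).foldl (fun d wn => d.insert wn.1 wn.2)
    (PySem.Dict.empty : PySem.Dict String Int) with hTdef
  have hT : T.keys.Nodup := by
    apply PySem.Dict.nodup_keys_foldl_insert_key
    exact PySem.Dict.nodup_keys_empty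
  have hiter : (discount.length : Int) - 10 + 1 = (discount.length : Int) - 9 := by ring
  rw [hiter]
  have hvals : ∀ v, v ∈ T.values ↔ ∃ kv ∈ T.items, kv.2 = v := by
    intro v
    simp [PySem.Dict.values]
  by_cases hneg : ∃ kv ∈ T.items, kv.2 ≤ 0
  · have hany : T.values.any (fun v => decide (v ≤ 0)) = true := by
      rcases hneg with ⟨kv, hkv, hle⟩
      simp only [List.any_eq_true]
      exact ⟨kv.2, (hvals kv.2).2 ⟨kv, hkv, rfl⟩, by simpa using hle⟩
    have hc : ((T.values.any fun v => decide (v ≤ 0)) || decide (T.values.sum ≠ 10)) = true := by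
      rw [hany]; rfl
    rw [if_pos hc]
    apply foldl_if_false
    intro i _
    rw [winfold_eq_counter, dictEq_counter_eq T hT]
    rcases hneg with ⟨kv, hkv, hle⟩
    simp only [Bool.and_eq_false_iff]
    right
    rw [List.all_eq_false]
    exact ⟨kv, hkv, by simp [not_lt.2 hle]⟩
  · have hpos : ∀ kv ∈ T.items, (0 : Int) < kv.2 := by
      intro kv hkv
      by_contra h
      exact hneg ⟨kv, hkv, not_lt.1 h⟩
    have hany : T.values.any (fun v => decide (v ≤ 0)) = false := by
      rw [List.any_eq_false]
      intro v hv
      rcases (hvals v).1 hv with ⟨kv, hkv, rfl⟩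
      simpa using not_le.2 (hpos kv hkv)
    by_cases hsum : T.values.sum = 10
    · rw [if_neg (by simp [hany, hsum])]
      congr 1
      funext answer i
      rw [zero_add, show (10 : Int) + i = i + 10 from add_comm _ _,
        winfold_eq_counter, dictEq_counter_eq T hT, char_eq_sorted T hT hpos]
      simp only [decide_eq_true_eq]
    · rw [if_pos (by simp [hany, hsum])]
      apply foldl_if_false
      intro i hi
      rw [zero_add, show (10 : Int) + i = i + 10 from add_comm _ _]
      rw [winfold_eq_counter, dictEq_counter_eq T hT, char_eq_sorted T hT hpos]
      rw [decide_eq_false_iff_not]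
      intro hs
      have hperm := (PySem.List.sorted_id_eq_sorted_id_iff_perm _ _).1 hs
      have hlen := hperm.length_eq
      rw [window_length discount i hi] at hlen
      have hG := length_expand T.items (fun kv hkv => hpos kv hkv)
      rw [← hlen] at hG
      apply hsum
      have : T.values = T.items.map Prod.snd := by simp [PySem.Dict.values]
      rw [this, ← hG]
      norm_num
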